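-- pv_equiv track=rewrite | github.com/kevin-a-nelson/leetCode | rotatingDigits.py | rotatesToOtherDigit
-- ===== SOURCE A (Python) =====
-- def rotatesToOtherDigit(digits):
--
--         digits = str(digits)
--         digitToRotatedDigit = {
--             '0': '0',
--             '1': '1',
--             '2': '5',
--             '5': '2',
--             '6': '9',
--             '8': '8',
--             '9': '6'
--         }
--
--         rotatedDigits = ""
--         for digit in digits:
--             if digit not in digitToRotatedDigit:
--                 return False
--             else:
--                 rotatedDigits += digitToRotatedDigit[digit]
--
--         if digits == rotatedDigits:
--             return False
--         return True
-- ===== SOURCE B (Python) =====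
-- def rotatesToOtherDigit(digits):
--     s = str(digits)
--     VALID = set('0125689')
--     CHANGING = set('2569')
--     return all(d in VALID for d in s) and any(d in CHANGING for d in s)
-- ===== Notes on version B (the rewrite author's own statement) =====
-- stated objective: simpler
-- what changed: B builds no rotated string: it replaces A's digit-by-digit rotation-map lookup, string accumulation and final equality test with two direct set-membership predicate checks (all digits valid, at least one digit changes under rotation).
import Mathlib
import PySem

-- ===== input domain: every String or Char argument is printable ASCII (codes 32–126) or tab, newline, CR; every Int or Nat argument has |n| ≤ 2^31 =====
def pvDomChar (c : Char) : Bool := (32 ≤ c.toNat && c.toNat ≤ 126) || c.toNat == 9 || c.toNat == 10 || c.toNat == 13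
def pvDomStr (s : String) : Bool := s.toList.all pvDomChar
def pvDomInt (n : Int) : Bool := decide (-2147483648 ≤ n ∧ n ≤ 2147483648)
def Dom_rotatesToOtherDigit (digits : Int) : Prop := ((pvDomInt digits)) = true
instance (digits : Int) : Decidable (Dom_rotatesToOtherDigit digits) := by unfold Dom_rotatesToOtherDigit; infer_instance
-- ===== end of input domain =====

-- B replaces A's build-rotated-string-and-compare with two direct membership predicates (all digits valid, some digit changes); objective: simpler.

-- ===== PORT A =====
-- the dict digitToRotatedDigit
def aRotMap : PySem.Dict Char Char :=
  PySem.Dict.ofList [('0','0'),('1','1'),('2','5'),('5','2'),('6','9'),('8','8'),('9','6')]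

-- the for-loop over the digits, carrying rotatedDigits as the accumulator; the final
-- 'digits == rotatedDigits' comparison happens when the loop runs off the end
def aLoop (orig : List Char) : List Char → List Char → Bool
  | [], acc => decide (orig ≠ acc)
  | d :: rest, acc =>
    match aRotMap.get? d with
    | none => false
    | some r => aLoop orig rest (acc ++ [r])

def rotatesToOtherDigit (digits : Int) : Bool :=
  let s := PySem.Int.toChars digits
  aLoop s s []

-- ===== PORT B =====
def bValid : PySem.Set Char := PySem.Set.ofList "0125689".toList
def bChanging : PySem.Set Char := PySem.Set.ofList "2569".toList

def rotatesToOtherDigit_alt (digits : Int) : Bool :=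
  let s := PySem.Int.toChars digits
  s.all (fun d => PySem.Set.contains bValid d) && s.any (fun d => PySem.Set.contains bChanging d)

-- ===== PRECONDITION & SPEC =====
def Spec_rotatesToOtherDigit (digits : Int) (out : Bool) : Prop := out = rotatesToOtherDigit_alt digits
instance (digits : Int) (out : Bool) : Decidable (Spec_rotatesToOtherDigit digits out) := by unfold Spec_rotatesToOtherDigit; infer_instance

-- ===== CLAIM (what is proved, stated in full; the proofs are below) =====
def Claim_equal_rotatesToOtherDigit : Prop := ∀ (digits : Int), Dom_rotatesToOtherDigit digits → Spec_rotatesToOtherDigit digits (rotatesToOtherDigit digits)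

-- ===== LEMMAS AND PROOFS =====

-- the rotation each valid digit maps to (proof-only helper)
def rotC (d : Char) : Char := (aRotMap.get? d).getD d

lemma aLoop_eq (orig : List Char) : ∀ (cs acc : List Char),
    aLoop orig cs acc
      = (cs.all (fun d => (aRotMap.get? d).isSome) && decide (orig ≠ acc ++ cs.map rotC)) := by
  intro cs
  induction cs with
  | nil => intro acc; simp [aLoop]
  | cons d rest ih =>
    intro acc
    cases h : aRotMap.get? d with
    | none => simp [aLoop, h]
    | some r =>
      simp only [aLoop, h, ih, List.all_cons, List.map_cons, rotC, Option.getD_some,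
        Option.isSome_some, Bool.true_and]
      have happ : acc ++ [r] ++ rest.map rotC = acc ++ (r :: rest.map rotC) := by simp
      rw [happ]

lemma valid_eq (d : Char) : (aRotMap.get? d).isSome = PySem.Set.contains bValid d := by
  by_cases h0 : d = '0'; · subst h0; decide
  by_cases h1 : d = '1'; · subst h1; decide
  by_cases h2 : d = '2'; · subst h2; decide
  by_cases h5 : d = '5'; · subst h5; decide
  by_cases h6 : d = '6'; · subst h6; decide
  by_cases h8 : d = '8'; · subst h8; decide
  by_cases h9 : d = '9'; · subst h9; decide
  have hk : aRotMap.keys = ['0','1','2','5','6','8','9'] := by decide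
  rw [(PySem.Dict.get?_eq_none_iff_not_mem_keys aRotMap d).2
    (by simp [hk, h0, h1, h2, h5, h6, h8, h9])]
  have hv : bValid = ['0','1','2','5','6','8','9'] := by decide
  simp [hv, PySem.Set.contains, h0, h1, h2, h5, h6, h8, h9]

lemma changing_eq (d : Char) (hv : PySem.Set.contains bValid d = true) :
    decide (d ≠ rotC d) = PySem.Set.contains bChanging d := by
  have hm : d ∈ bValid := (PySem.Set.contains_iff _ _).mp hv
  have hcase : d = '0' ∨ d = '1' ∨ d = '2' ∨ d = '5' ∨ d = '6' ∨ d = '8' ∨ d = '9' := by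
    simpa [bValid, PySem.Set.ofList, PySem.Set.add] using hm
  rcases hcase with h|h|h|h|h|h|h <;> subst h <;> decide

lemma ne_map_iff_any (s : List Char)
    (hall : s.all (fun d => PySem.Set.contains bValid d) = true) :
    decide (s ≠ s.map rotC) = s.any (fun d => PySem.Set.contains bChanging d) := by
  induction s with
  | nil => decide
  | cons d rest ih =>
    simp only [List.all_cons, Bool.and_eq_true] at hall
    simp only [List.map_cons, List.any_cons]
    rw [← changing_eq d hall.1, ← ih hall.2]
    by_cases hdd : d = rotC d <;> by_cases hrr : rest = List.map rotC rest
    · simp [← hdd, ← hrr]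
    · simp [← hdd, hrr]
    · simp [hdd, ← hrr]
    · simp [hdd, hrr]

-- ===== VERDICT (by name: the statement is the Claim_ definition above) =====
theorem rotatesToOtherDigit_spec : Claim_equal_rotatesToOtherDigit := by
  intro digits _
  unfold Spec_rotatesToOtherDigit rotatesToOtherDigit rotatesToOtherDigit_alt
  rw [aLoop_eq]
  simp only [List.nil_append]
  rw [show (fun d => (aRotMap.get? d).isSome)
        = (fun d => PySem.Set.contains bValid d) from funext fun d => valid_eq d]
  cases hall : (PySem.Int.toChars digits).all (fun d => PySem.Set.contains bValid d) with
  | false => simp only [Bool.false_and]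
  | true =>
    simp only [Bool.true_and]
    exact ne_map_iff_any _ hall
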